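-- pv_equiv track=rewrite | github.com/arielgamino/pycharm_fellowshipapi | util/features.py | document_features
-- ===== SOURCE A (Python) =====
-- import string
--
-- def document_features(document, word_features, letter_features):
--     #normalize words
--     document = [w.lower() for w in document]
--     document_words = set(document)
--     features = {}
--     # Add word that are part of common words
--     for word in word_features:
--         features[word] = (word in document_words)
--     # Add letters that are part of common letters
--     # get letters and add to alphabet
--     document_alphabet = set()
--     [document_alphabet.update(list(n)) for n in document_words]
--     # document_alphabet now contains all letters on this document
--     # Keep only letters that are not common ascii letters
--     for letter in list(document_alphabet):
--         if (letter in list(string.ascii_letters) or letter in list(string.digits)):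
--             document_alphabet.remove(letter)
--     # Add to feature if exist
--     for l in letter_features:
--         features[l] = (l in document_alphabet)
--     return features
-- ===== SOURCE B (Python) =====
-- import string
--
-- def document_features(document, word_features, letter_features):
--     # search-based: sort once + binary search per word feature; one joined text
--     # searched per letter feature.  No membership sets are built.
--     lowered = sorted(w.lower() for w in document)
--     text = ''.join(lowered)
--     features = {}
--     for word in word_features:
--         lo, hi = 0, len(lowered)
--         while lo < hi:
--             mid = (lo + hi) // 2
--             if lowered[mid] < word:
--                 lo = mid + 1
--             else:
--                 hi = mid
--         features[word] = lo < len(lowered) and lowered[lo] == word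
--     for l in letter_features:
--         features[l] = (len(l) == 1 and l not in string.ascii_letters
--                        and l not in string.digits and l in text)
--     return features
-- ===== Notes on version B (the rewrite author's own statement) =====
-- stated objective: alternative
-- what changed: B builds no word set and no document-alphabet set: it sorts the lowered words once and answers each word feature by a hand-written binary search, and answers each letter feature by a direct per-query test (length-1, non-alphanumeric, substring search in the concatenation of the lowered words), replacing A's build-two-sets-then-lookup (including its accumulate-then-prune alphabet passes) with sort-plus-search.
import Mathlib
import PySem

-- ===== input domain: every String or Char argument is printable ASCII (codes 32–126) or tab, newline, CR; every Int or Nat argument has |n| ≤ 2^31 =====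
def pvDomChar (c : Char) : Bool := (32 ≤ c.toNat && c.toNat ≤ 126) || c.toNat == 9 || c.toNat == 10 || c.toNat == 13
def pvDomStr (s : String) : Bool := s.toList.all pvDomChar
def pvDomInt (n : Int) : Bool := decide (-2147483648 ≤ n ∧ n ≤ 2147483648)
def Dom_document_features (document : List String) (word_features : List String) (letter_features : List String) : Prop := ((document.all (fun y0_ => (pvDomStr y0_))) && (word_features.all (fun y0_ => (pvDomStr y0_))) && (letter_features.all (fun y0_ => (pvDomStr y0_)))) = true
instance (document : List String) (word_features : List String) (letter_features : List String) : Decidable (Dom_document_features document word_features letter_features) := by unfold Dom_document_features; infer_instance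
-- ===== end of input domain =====

-- B builds no word set and no document-alphabet set: it sorts the lowered words once and
-- binary-searches each word feature, and answers each letter feature by a direct per-query
-- substring test in the joined text (objective: alternative); return values proved equal.


-- ===== PORT A =====
-- list(s) for a Python string s: its characters as 1-char strings
def pvSing (c : Char) : String := String.ofList [c]
def pvAsciiLetters : List Char := "abcdefghijklmnopqrstuvwxyzABCDEFGHIJKLMNOPQRSTUVWXYZ".toList
def pvDigits : List Char := "0123456789".toList
-- list(string.ascii_letters) / list(string.digits): lists of 1-char strings
def pvAsciiLetterStrs : List String := pvAsciiLetters.map pvSing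
def pvDigitStrs : List String := pvDigits.map pvSing

def document_features (document : List String) (word_features : List String) (letter_features : List String) : List (String × Bool) :=
  let document' := document.map PySem.Str.lower
  let document_words : PySem.Set String := PySem.Set.ofList document'
  let features : PySem.Dict String Bool :=
    word_features.foldl (fun d word => d.insert word (PySem.Set.contains document_words word)) PySem.Dict.empty
  let document_alphabet : PySem.Set String :=
    document_words.foldl (fun s n => PySem.Set.update s (n.toList.map pvSing)) PySem.Set.empty
  -- 'for letter in list(document_alphabet): if …: document_alphabet.remove(letter)' — a snapshot of the
  -- set is iterated (the result is only used for membership, so the iteration order cannot matter);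
  -- remove never raises here, so '(remove? …).getD s' is exact (remove? = some (discard) on members).
  let document_alphabet2 : PySem.Set String :=
    document_alphabet.foldl
      (fun s letter =>
        if pvAsciiLetterStrs.contains letter || pvDigitStrs.contains letter then
          (PySem.Set.remove? s letter).getD s
        else s)
      document_alphabet
  let features :=
    letter_features.foldl (fun d l => d.insert l (PySem.Set.contains document_alphabet2 l)) features
  features.items

-- ===== PORT B =====
def pvAsciiLettersStr : String := "abcdefghijklmnopqrstuvwxyzABCDEFGHIJKLMNOPQRSTUVWXYZ"
def pvDigitsStr : String := "0123456789"

-- Source B's hand-written 'while lo < hi' binary-search loop; lowered[mid] is always in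
-- range when hi ≤ len (holds at every call), so getD is exact there.
def pvBsearch (a : List String) (x : String) (lo hi : Nat) : Nat :=
  if lo < hi then
    let mid := (lo + hi) / 2
    if a.getD mid "" < x then pvBsearch a x (mid + 1) hi else pvBsearch a x lo mid
  else lo
termination_by hi - lo
decreasing_by all_goals omega

def document_features_alt (document : List String) (word_features : List String) (letter_features : List String) : List (String × Bool) :=
  let lowered := PySem.List.sorted (document.map PySem.Str.lower) (fun w => w)
  let text := PySem.Str.join "" lowered
  let features : PySem.Dict String Bool :=
    word_features.foldl
      (fun d word =>
        let lo := pvBsearch lowered word 0 lowered.length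
        -- 'lo < len(lowered) and lowered[lo] == word': the index is only read when in range
        d.insert word (decide (lo < lowered.length) && (lowered.getD lo "" == word)))
      PySem.Dict.empty
  -- len(l) == 1 and l not in ascii_letters and l not in digits and l in text
  let features :=
    letter_features.foldl
      (fun d l => d.insert l
        ((PySem.Str.len l == 1) && !(PySem.Str.isIn l pvAsciiLettersStr)
          && !(PySem.Str.isIn l pvDigitsStr) && PySem.Str.isIn l text))
      features
  features.items

-- ===== PRECONDITION & SPEC =====
def Spec_document_features (document : List String) (word_features : List String) (letter_features : List String) (out : List (String × Bool)) : Prop := out = document_features_alt document word_features letter_features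
instance (document : List String) (word_features : List String) (letter_features : List String) (out : List (String × Bool)) : Decidable (Spec_document_features document word_features letter_features out) := by unfold Spec_document_features; infer_instance

-- ===== CLAIM (what is proved, stated in full; the proofs are below) =====
def Claim_equal_document_features : Prop := ∀ (document : List String) (word_features : List String) (letter_features : List String), Dom_document_features document word_features letter_features → Spec_document_features document word_features letter_features (document_features document word_features letter_features)

-- ===== LEMMAS AND PROOFS =====

theorem pv_sing_inj {a b : Char} (h : pvSing a = pvSing b) : a = b := by
  have h2 := congrArg String.toList h
  simp only [pvSing, String.toList_ofList] at h2
  exact List.singleton_injective h2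

theorem pv_sing_mem_map (c : Char) (cs : List Char) :
    pvSing c ∈ cs.map pvSing ↔ c ∈ cs := by
  constructor
  · intro h
    rcases List.mem_map.mp h with ⟨d, hd, he⟩
    exact (pv_sing_inj he.symm) ▸ hd
  · exact fun h => List.mem_map.mpr ⟨c, h, rfl⟩

-- the removal test on a 1-char string, as char membership
theorem pv_bad_sing (c : Char) :
    (pvAsciiLetterStrs.contains (pvSing c) || pvDigitStrs.contains (pvSing c))
      = (pvAsciiLetters.contains c || pvDigits.contains c) := by
  simp only [pvAsciiLetterStrs, pvDigitStrs, List.contains_eq_mem, pv_sing_mem_map]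

-- 'sub in s' for the 1-char string sub is char membership
theorem pv_isIn_sing (c : Char) (s : String) :
    PySem.Str.isIn (pvSing c) s = s.toList.contains c := by
  rw [Bool.eq_iff_iff, PySem.Str.isIn_iff_infix, List.contains_iff_mem]
  simp only [pvSing, String.toList_ofList]
  exact List.singleton_infix_iff c s.toList

-- ''.join of char lists is their concatenation
theorem pv_join_nil_flatten (ls : List (List Char)) :
    PySem.Chars.join ([] : List Char) ls = ls.flatten := by
  show List.intercalate [] ls = ls.flatten
  induction ls with
  | nil => rfl
  | cons a t ih =>
      cases t with
      | nil => simp [List.intercalate]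
      | cons b t2 =>
          simp only [List.intercalate, List.intersperse] at *
          simp_all [List.flatten]

-- a 1-char string is in ''.join(ws) iff its char is in some word
theorem pv_isIn_sing_join (c : Char) (ws : List String) :
    PySem.Str.isIn (pvSing c) (PySem.Str.join "" ws) = true ↔ ∃ w ∈ ws, c ∈ w.toList := by
  rw [pv_isIn_sing, List.contains_iff_mem, PySem.Str.toList_join]
  have h0 : ("" : String).toList = ([] : List Char) := rfl
  rw [h0, pv_join_nil_flatten]
  simp only [List.mem_flatten, List.mem_map]
  constructor
  · rintro ⟨cs, ⟨w, hw, rfl⟩, hc⟩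
    exact ⟨w, hw, hc⟩
  · rintro ⟨w, hw, hc⟩
    exact ⟨w.toList, ⟨w, hw, rfl⟩, hc⟩

-- '(remove? s x).getD s' is unconditionally 'discard s x'
theorem pv_removeD_eq_discard (t : PySem.Set String) (x : String) :
    (PySem.Set.remove? t x).getD t = PySem.Set.discard t x := by
  by_cases hx : x ∈ t
  · rw [PySem.Set.remove?_of_mem hx]; rfl
  · have hco : t.contains x ≠ true := by
      exact fun h => hx ((PySem.Set.contains_iff t x).mp h)
    have h1 : t.remove? x = none := by
      simp only [PySem.Set.remove?, if_neg hco]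
    have h2 : PySem.Set.discard t x = t :=
      List.filter_eq_self.mpr (by
        intro a ha
        simp only [Bool.not_eq_eq_eq_not, Bool.not_true, beq_eq_false_iff_ne, ne_eq]
        exact fun h => hx (h ▸ ha))
    rw [h1, h2]; rfl

-- membership after the conditional-discard loop
theorem pv_mem_foldl_discard (p : String → Bool) (L : List String) (s : PySem.Set String) (y : String) :
    y ∈ L.foldl (fun s letter => if p letter then PySem.Set.discard s letter else s) s ↔
      y ∈ s ∧ ¬(p y = true ∧ y ∈ L) := by
  induction L generalizing s with
  | nil => simp
  | cons x L ih =>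
      rw [List.foldl_cons]
      by_cases hpx : p x = true
      · rw [if_pos hpx, ih]
        by_cases hyx : y = x
        · subst hyx; simp [PySem.Set.mem_discard, hpx, List.mem_cons]
        · simp only [PySem.Set.mem_discard, List.mem_cons, ne_eq, hyx]
          tauto
      · rw [if_neg hpx, ih]
        by_cases hyx : y = x
        · subst hyx; simp only [List.mem_cons, hpx]
          tauto
        · simp only [List.mem_cons, hyx]
          tauto

-- membership after the conditional-remove loop
theorem pv_mem_foldl_remove (p : String → Bool) (L : List String) (s : PySem.Set String) (y : String) :
    y ∈ L.foldl (fun s letter => if p letter then (PySem.Set.remove? s letter).getD s else s) s ↔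
      y ∈ s ∧ ¬(p y = true ∧ y ∈ L) := by
  have hc : L.foldl (fun s letter => if p letter then (PySem.Set.remove? s letter).getD s else s) s
      = L.foldl (fun s letter => if p letter then PySem.Set.discard s letter else s) s :=
    PySem.List.foldl_congr_mem _ _ _ _ (by
      intro acc x _
      by_cases hp : p x = true <;> simp [hp, pv_removeD_eq_discard])
  rw [hc, pv_mem_foldl_discard]

-- membership in the accumulated alphabet
theorem pv_mem_alpha (W : List String) (s : PySem.Set String) (y : String) :
    y ∈ W.foldl (fun s n => PySem.Set.update s (n.toList.map pvSing)) s ↔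
      y ∈ s ∨ ∃ n ∈ W, y ∈ n.toList.map pvSing := by
  induction W generalizing s with
  | nil => simp
  | cons w W ih =>
      rw [List.foldl_cons, ih]
      simp only [PySem.Set.mem_update, List.mem_cons]
      constructor
      · rintro ((h | h) | ⟨n, hn, hy⟩)
        · exact Or.inl h
        · exact Or.inr ⟨w, Or.inl rfl, h⟩
        · exact Or.inr ⟨n, Or.inr hn, hy⟩
      · rintro (h | ⟨n, (rfl | hn), hy⟩)
        · exact Or.inl (Or.inl h)
        · exact Or.inl (Or.inr hy)
        · exact Or.inr ⟨n, hn, hy⟩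

-- the binary-search loop: bounds and the separation invariant it maintains
theorem pv_bsearch_spec (a : List String) (x : String) (lo hi : Nat)
    (hs : a.Pairwise (· ≤ ·)) (hhi : hi ≤ a.length) (hlo : lo ≤ hi)
    (h1 : ∀ j (_ : j < lo) (hj : j < a.length), a[j] < x)
    (h2 : ∀ j (_ : hi ≤ j) (hj : j < a.length), x ≤ a[j]) :
    lo ≤ pvBsearch a x lo hi ∧ pvBsearch a x lo hi ≤ hi ∧
      (∀ j (_ : j < pvBsearch a x lo hi) (hj : j < a.length), a[j] < x) ∧
      (∀ j (_ : pvBsearch a x lo hi ≤ j) (hj : j < a.length), x ≤ a[j]) := by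
  have hpair := List.pairwise_iff_getElem.mp hs
  fun_induction pvBsearch a x lo hi with
  | case1 lo hi hlh mid hmid ih =>
      have hmlt : mid < hi := by omega
      have hmlen : mid < a.length := by omega
      have hmid' : a[mid] < x := by
        rwa [List.getD_eq_getElem a "" hmlen] at hmid
      have h1' : ∀ j (_ : j < mid + 1) (hj : j < a.length), a[j] < x := by
        intro j hjm hj
        rcases Nat.lt_or_ge j mid with h | h
        · exact lt_of_le_of_lt (hpair j mid hj hmlen h) hmid'
        · have : j = mid := by omega
          subst this; exact hmid'
      have := ih (by omega) (by omega) h1' h2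
      exact ⟨by omega, this.2.1, this.2.2⟩
  | case2 lo hi hlh mid hmid ih =>
      have hmlt : mid < hi := by omega
      have hmlen : mid < a.length := by omega
      have hmid' : x ≤ a[mid] := by
        rw [List.getD_eq_getElem a "" hmlen] at hmid
        exact le_of_not_gt (by simpa using hmid)
      have h2' : ∀ j (_ : mid ≤ j) (hj : j < a.length), x ≤ a[j] := by
        intro j hjm hj
        rcases Nat.lt_or_ge j hi with h | h
        · rcases Nat.eq_or_lt_of_le hjm with rfl | h'
          · exact hmid'
          · exact le_trans hmid' (hpair mid j hmlen hj h')
        · exact h2 j h hj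
      have := ih (by omega) (by omega) h1 h2'
      exact ⟨this.1, by omega, this.2.2⟩
  | case3 lo hi hlh =>
      have : lo = hi ∨ hi < lo := by omega
      exact ⟨le_refl _, by omega, h1, fun j hj hjl => h2 j (by omega) hjl⟩

-- Source B's 'lo < len(lowered) and lowered[lo] == word' decides membership in the sorted list
theorem pv_bsearch_mem (a : List String) (hs : a.Pairwise (· ≤ ·)) (x : String) :
    (decide (pvBsearch a x 0 a.length < a.length)
      && (a.getD (pvBsearch a x 0 a.length) "" == x)) = true ↔ x ∈ a := by
  obtain ⟨-, hle, hlt, hge⟩ :=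
    pv_bsearch_spec a x 0 a.length hs (le_refl _) (Nat.zero_le _)
      (fun j hj _ => absurd hj (Nat.not_lt_zero j))
      (fun j hj hjl => absurd hjl (by omega))
  set r := pvBsearch a x 0 a.length with hr
  simp only [Bool.and_eq_true, decide_eq_true_eq, beq_iff_eq]
  constructor
  · rintro ⟨hrl, hx⟩
    rw [List.getD_eq_getElem a "" hrl] at hx
    exact hx ▸ List.getElem_mem hrl
  · intro hxm
    rcases List.mem_iff_getElem.mp hxm with ⟨j, hj, hje⟩
    have hrj : r ≤ j := by
      by_contra h
      exact absurd hje (ne_of_lt (hlt j (by omega) hj))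
    have hrl : r < a.length := by omega
    have hxr : x ≤ a[r] := hge r (le_refl r) hrl
    have hrx : a[r] ≤ x := by
      rcases Nat.eq_or_lt_of_le hrj with rfl | h'
      · exact le_of_eq hje
      · exact hje ▸ List.pairwise_iff_getElem.mp hs r j hrl hj h'
    exact ⟨hrl, by rw [List.getD_eq_getElem a "" hrl]; exact le_antisymm hrx hxr⟩

-- A's word bool (set membership) = B's word bool (binary search in the sorted list)
theorem pv_word_bool (W : List String) (w : String) :
    PySem.Set.contains (PySem.Set.ofList W) w
      = (decide (pvBsearch (PySem.List.sorted W (fun x => x)) w 0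
            (PySem.List.sorted W (fun x => x)).length < (PySem.List.sorted W (fun x => x)).length)
          && ((PySem.List.sorted W (fun x => x)).getD
                (pvBsearch (PySem.List.sorted W (fun x => x)) w 0
                  (PySem.List.sorted W (fun x => x)).length) "" == w)) := by
  rw [Bool.eq_iff_iff, PySem.Set.contains_iff, PySem.Set.mem_ofList,
    pv_bsearch_mem _ (PySem.List.sorted_pairwise W (fun x => x)) w,
    PySem.List.mem_sorted]

-- the central fact: A's pruned-alphabet membership bool = B's direct per-query test
theorem pv_letter_bool (document : List String) (l : String) :
    PySem.Set.contains
      ((((PySem.Set.ofList (document.map PySem.Str.lower)).foldl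
          (fun s n => PySem.Set.update s (n.toList.map pvSing)) PySem.Set.empty)).foldl
        (fun s letter =>
          if pvAsciiLetterStrs.contains letter || pvDigitStrs.contains letter then
            (PySem.Set.remove? s letter).getD s
          else s)
        ((PySem.Set.ofList (document.map PySem.Str.lower)).foldl
          (fun s n => PySem.Set.update s (n.toList.map pvSing)) PySem.Set.empty)) l
    = ((PySem.Str.len l == 1) && !(PySem.Str.isIn l pvAsciiLettersStr)
        && !(PySem.Str.isIn l pvDigitsStr)
        && PySem.Str.isIn l
            (PySem.Str.join "" (PySem.List.sorted (document.map PySem.Str.lower) (fun w => w)))) := by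
  set W := document.map PySem.Str.lower with hW
  have halpha : ∀ y : String,
      y ∈ (PySem.Set.ofList W).foldl (fun s n => PySem.Set.update s (n.toList.map pvSing)) PySem.Set.empty ↔
        ∃ w ∈ W, y ∈ w.toList.map pvSing := by
    intro y
    rw [pv_mem_alpha]
    constructor
    · rintro (h | ⟨n, hn, hy⟩)
      · exact absurd h (by simp [PySem.Set.empty])
      · exact ⟨n, (PySem.Set.mem_ofList _ _).mp hn, hy⟩
    · rintro ⟨w, hw, hy⟩
      exact Or.inr ⟨w, (PySem.Set.mem_ofList _ _).mpr hw, hy⟩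
  rw [Bool.eq_iff_iff, PySem.Set.contains_iff, pv_mem_foldl_remove]
  have hlen : PySem.Str.len l = (l.toList.length : Int) := by
    simp [PySem.Str.len_eq]
  rcases hsing : l.toList with _ | ⟨c, rest⟩
  · -- empty string: both sides false
    constructor
    · rintro ⟨hmem, -⟩
      rcases (halpha l).mp hmem with ⟨w, -, hy⟩
      rcases List.mem_map.mp hy with ⟨d, -, he⟩
      have := congrArg String.toList he
      simp [pvSing, hsing] at this
    · intro hb
      simp only [Bool.and_eq_true, beq_iff_eq, hlen, hsing] at hb
      simp at hb
  · rcases rest with _ | ⟨c2, rest2⟩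
    · -- singleton: l = pvSing c
      have hl : l = pvSing c := by
        rw [pvSing, ← hsing]; exact String.ofList_toList.symm
      rw [hl, pv_bad_sing]
      have hA : pvSing c ∈ (PySem.Set.ofList W).foldl
          (fun s n => PySem.Set.update s (n.toList.map pvSing)) PySem.Set.empty ↔
          ∃ w ∈ W, c ∈ w.toList := by
        rw [halpha]
        exact ⟨fun ⟨w, hw, hy⟩ => ⟨w, hw, (pv_sing_mem_map c _).mp hy⟩,
               fun ⟨w, hw, hc⟩ => ⟨w, hw, (pv_sing_mem_map c _).mpr hc⟩⟩
      rw [hA]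
      have hLc : pvAsciiLettersStr.toList = pvAsciiLetters := rfl
      have hDc : pvDigitsStr.toList = pvDigits := rfl
      have hinL : PySem.Str.isIn (pvSing c) pvAsciiLettersStr = pvAsciiLetters.contains c := by
        rw [pv_isIn_sing, hLc]
      have hinD : PySem.Str.isIn (pvSing c) pvDigitsStr = pvDigits.contains c := by
        rw [pv_isIn_sing, hDc]
      have hlen1 : PySem.Str.len (pvSing c) = 1 := by
        simp [PySem.Str.len_eq, pvSing]
      have hjoin : PySem.Str.isIn (pvSing c)
          (PySem.Str.join "" (PySem.List.sorted W (fun w => w))) = true ↔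
          ∃ w ∈ W, c ∈ w.toList := by
        rw [pv_isIn_sing_join]
        simp [PySem.List.mem_sorted]
      simp only [hinL, hinD, hlen1, hjoin, Bool.and_eq_true, beq_iff_eq,
        Bool.not_eq_true', List.contains_iff_mem, Bool.or_eq_true]
      constructor
      · rintro ⟨hmem, hnb⟩
        refine ⟨⟨⟨trivial, ?_⟩, ?_⟩, hmem⟩
        · rw [← Bool.not_eq_true, List.contains_iff_mem]
          exact fun h => hnb ⟨Or.inl h, hmem⟩
        · rw [← Bool.not_eq_true, List.contains_iff_mem]
          exact fun h => hnb ⟨Or.inr h, hmem⟩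
      · rintro ⟨⟨⟨-, hL⟩, hD⟩, hmem⟩
        rw [← Bool.not_eq_true, List.contains_iff_mem] at hL hD
        exact ⟨hmem, fun h => h.1.elim hL hD⟩
    · -- length ≥ 2: both sides false
      constructor
      · rintro ⟨hmem, -⟩
        rcases (halpha l).mp hmem with ⟨w, -, hy⟩
        rcases List.mem_map.mp hy with ⟨d, -, he⟩
        have := congrArg String.toList he
        simp [pvSing, hsing] at this
      · intro hb
        simp only [Bool.and_eq_true, beq_iff_eq, hlen, hsing, List.length_cons] at hb
        have := hb.1.1.1
        omega

-- ===== VERDICT (by name: the statement is the Claim_ definition above) =====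
theorem document_features_spec : Claim_equal_document_features := by
  intro document word_features letter_features _
  unfold Spec_document_features document_features document_features_alt
  apply congrArg PySem.Dict.items
  have h1 : word_features.foldl
      (fun d word => d.insert word (PySem.Set.contains (PySem.Set.ofList (document.map PySem.Str.lower)) word))
      PySem.Dict.empty
      = word_features.foldl
      (fun d word =>
        d.insert word
          (decide (pvBsearch (PySem.List.sorted (document.map PySem.Str.lower) (fun w => w)) word 0
              (PySem.List.sorted (document.map PySem.Str.lower) (fun w => w)).length
              < (PySem.List.sorted (document.map PySem.Str.lower) (fun w => w)).length)
            && ((PySem.List.sorted (document.map PySem.Str.lower) (fun w => w)).getD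
                  (pvBsearch (PySem.List.sorted (document.map PySem.Str.lower) (fun w => w)) word 0
                    (PySem.List.sorted (document.map PySem.Str.lower) (fun w => w)).length) "" == word)))
      PySem.Dict.empty :=
    PySem.List.foldl_congr_mem _ _ _ _ (by intro d w _; rw [pv_word_bool])
  simp only [h1]
  exact PySem.List.foldl_congr_mem _ _ _ _ (by intro d l _; rw [pv_letter_bool])
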